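-- pv_equiv track=rewrite | github.com/siddhibhor-56/Competitive-Programming | Codechef/Lapindromes.py | check
-- ===== SOURCE A (Python) =====
-- def check(s1,s2):
--     count=0
--     for i in s1:
--         if i in s2:
--             if (s1.count(i)==s2.count(i)):
--                 count=count+1
--     if count==len(s1):
--         return True
--     else:
--         return False
-- ===== SOURCE B (Python) =====
-- def check(s1, s2):
--     chars = set(s1)
--     return sorted(s1) == sorted(c for c in s2 if c in chars)
-- ===== Notes on version B (the rewrite author's own statement) =====
-- stated objective: faster
-- what changed: Replaced the per-character loop that rescans both strings with .count/in for every character of s1 by a single multiset comparison: sorted(s1) versus the sorted list of s2's characters that occur in s1.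
import Mathlib
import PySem

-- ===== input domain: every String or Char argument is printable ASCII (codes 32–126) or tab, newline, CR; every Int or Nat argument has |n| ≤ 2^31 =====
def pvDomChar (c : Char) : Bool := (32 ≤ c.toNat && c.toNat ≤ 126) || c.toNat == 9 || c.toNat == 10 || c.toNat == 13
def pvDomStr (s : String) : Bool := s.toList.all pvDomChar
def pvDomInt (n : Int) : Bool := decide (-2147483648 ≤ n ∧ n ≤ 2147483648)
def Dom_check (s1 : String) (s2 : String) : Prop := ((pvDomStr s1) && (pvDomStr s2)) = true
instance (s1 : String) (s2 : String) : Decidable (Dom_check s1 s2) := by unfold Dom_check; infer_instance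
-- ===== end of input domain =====

-- B replaces A's per-character loop with full-string .count scans by one sorted-multiset comparison (objective: simpler).

-- ===== PORT A =====
-- 'i in s2' and 's1.count(i)' on a single character are exactly char membership / char count.
def check (s1 : String) (s2 : String) : Bool :=
  let count : Int := s1.toList.foldl (fun count i =>
    if s2.toList.contains i then
      if s1.toList.count i == s2.toList.count i then count + 1 else count
    else count) 0
  if count == (s1.toList.length : Int) then true else false

-- ===== PORT B =====
def check_alt (s1 : String) (s2 : String) : Bool :=
  let chars := PySem.Set.ofList s1.toList
  PySem.List.sorted s1.toList (fun x => x) false ==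
    PySem.List.sorted (s2.toList.filter (fun c => chars.contains c)) (fun x => x) false

-- ===== PRECONDITION & SPEC =====
def Spec_check (s1 : String) (s2 : String) (out : Bool) : Prop := out = check_alt s1 s2
instance (s1 : String) (s2 : String) (out : Bool) : Decidable (Spec_check s1 s2 out) := by unfold Spec_check; infer_instance

-- ===== CLAIM (what is proved, stated in full; the proofs are below) =====
def Claim_equal_check : Prop := ∀ (s1 : String) (s2 : String), Dom_check s1 s2 → Spec_check s1 s2 (check s1 s2)

-- ===== LEMMAS AND PROOFS =====

-- A's loop counts the characters of s1 whose membership-and-count test succeeds.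
theorem check_foldl_eq_countP (a b : List Char) :
    a.foldl (fun count i =>
      if b.contains i then
        if a.count i == b.count i then count + 1 else count
      else count) (0 : Int)
    = (a.countP (fun i => b.contains i && (a.count i == b.count i)) : Int) := by
  have h : ∀ (l : List Char) (acc : Int),
      l.foldl (fun count i =>
        if b.contains i then
          if a.count i == b.count i then count + 1 else count
        else count) acc
      = acc + (l.countP (fun i => b.contains i && (a.count i == b.count i)) : Int) := by
    intro l
    induction l with
    | nil => simp
    | cons x xs ih =>
      intro acc
      simp only [List.foldl_cons, List.countP_cons, ih]
      by_cases hx : x ∈ b <;> by_cases h2 : (a.count x == b.count x) = true <;>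
        simp [hx, h2] <;> ring
  simpa using h a 0

theorem check_true_iff (s1 s2 : String) :
    check s1 s2 = true ↔
      ∀ i ∈ s1.toList, s1.toList.count i = s2.toList.count i := by
  unfold check
  rw [check_foldl_eq_countP]
  simp only [beq_iff_eq, Nat.cast_inj, Bool.if_true_left, Bool.or_false, decide_eq_true_eq]
  rw [List.countP_eq_length]
  constructor
  · intro h i hi
    have := h i hi
    simp only [Bool.and_eq_true, List.contains_iff_mem, beq_iff_eq] at this
    exact this.2
  · intro h i hi
    have hc := h i hi
    have hpos : 0 < s1.toList.count i := List.count_pos_iff.mpr hi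
    have hmem : i ∈ s2.toList := List.count_pos_iff.mp (hc ▸ hpos)
    simp [hmem, hc]

-- counting in s2 filtered to s1's character set
theorem count_filter_chars (s1 s2 : List Char) (c : Char) :
    (s2.filter (fun c => (PySem.Set.ofList s1).contains c)).count c
      = if c ∈ s1 then s2.count c else 0 := by
  by_cases hc : c ∈ s1
  · rw [if_pos hc, List.count_filter]
    simp [PySem.Set.mem_ofList, hc]
  · rw [if_neg hc, List.count_eq_zero]
    intro hmem
    have := List.of_mem_filter hmem
    simp [PySem.Set.mem_ofList] at this
    exact hc this

theorem check_alt_true_iff (s1 s2 : String) :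
    check_alt s1 s2 = true ↔
      ∀ i ∈ s1.toList, s1.toList.count i = s2.toList.count i := by
  unfold check_alt
  rw [beq_iff_eq, PySem.List.sorted_id_eq_sorted_id_iff_perm, List.perm_iff_count]
  constructor
  · intro h i hi
    have := h i
    rwa [count_filter_chars, if_pos hi] at this
  · intro h c
    rw [count_filter_chars]
    by_cases hc : c ∈ s1.toList
    · rw [if_pos hc]; exact h c hc
    · rw [if_neg hc]; exact List.count_eq_zero.mpr hc

-- ===== VERDICT (by name: the statement is the Claim_ definition above) =====
theorem check_spec : Claim_equal_check := by
  intro s1 s2 _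
  unfold Spec_check
  exact Bool.coe_iff_coe.mp ((check_true_iff s1 s2).trans (check_alt_true_iff s1 s2).symm)
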